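-- pv_equiv track=rewrite | github.com/traderparamita/market-summary | portfolio/view/_shared.py | nav_html
-- ===== SOURCE A (Python) =====
-- ALL_VIEWS = [
--     # Phase 1
--     ("price",       "가격신호",   "P1"),
--     ("macro",       "거시지표",   "P1"),
--     ("correlation", "상관관계",   "P1"),
--     ("regime",      "국면해설",   "P1"),
--     # Phase 2
--     ("country",     "국가",       "P2"),
--     ("sector",      "섹터",       "P2"),
--     ("bond",        "채권",       "P2"),
--     ("style",       "스타일",     "P2"),
--     ("allocation",  "배분안",     "P2"),
--     ("alternative", "대체자산",   "P2"),
--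
-- ]
--
-- def nav_html(date_str: str, current: str = "") -> str:
--     """Top navigation bar with links to all views for this date."""
--     links = []
--     last_phase = None
--     for key, label, phase in ALL_VIEWS:
--         if phase != last_phase:
--             if last_phase is not None:
--                 links.append('<div class="ma-nav-sep"></div>')
--             links.append(f'<span class="ma-nav-group">{phase}</span>')
--             last_phase = phase
--         cls = 'ma-nav-link current' if key == current else 'ma-nav-link'
--         links.append(f'<a href="../{key}/{date_str}.html" class="{cls}">{label}</a>')
--
--     links_html = "\n    ".join(links)
--     return f"""<nav class="ma-nav">
--   <div class="ma-nav-inner">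
--     <a href="../../index.html" class="ma-logo"><span></span>미래에셋생명</a>
--     {links_html}
--   </div>
-- </nav>"""
-- ===== SOURCE B (Python) =====
-- ALL_VIEWS = [
--     # Phase 1
--     ("price",       "가격신호",   "P1"),
--     ("macro",       "거시지표",   "P1"),
--     ("correlation", "상관관계",   "P1"),
--     ("regime",      "국면해설",   "P1"),
--     # Phase 2
--     ("country",     "국가",       "P2"),
--     ("sector",      "섹터",       "P2"),
--     ("bond",        "채권",       "P2"),
--     ("style",       "스타일",     "P2"),
--     ("allocation",  "배분안",     "P2"),
--     ("alternative", "대체자산",   "P2"),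
--
-- ]
--
--
-- def _phase_groups(views):
--     """Group consecutive views sharing a phase: [(phase, [(key, label), ...]), ...]."""
--     groups = []
--     for key, label, phase in views:
--         if groups and groups[-1][0] == phase:
--             groups[-1][1].append((key, label))
--         else:
--             groups.append((phase, [(key, label)]))
--     return groups
--
--
-- def nav_html(date_str: str, current: str = "") -> str:
--     """Top navigation bar with links to all views for this date."""
--     blocks = [
--         "\n    ".join(
--             [f'<span class="ma-nav-group">{phase}</span>']
--             + [f'<a href="../{key}/{date_str}.html" class="'
--                + ('ma-nav-link current' if key == current else 'ma-nav-link')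
--                + f'">{label}</a>' for key, label in items]
--         )
--         for phase, items in _phase_groups(ALL_VIEWS)
--     ]
--     links_html = '\n    <div class="ma-nav-sep"></div>\n    '.join(blocks)
--     return f"""<nav class="ma-nav">
--   <div class="ma-nav-inner">
--     <a href="../../index.html" class="ma-logo"><span></span>미래에셋생명</a>
--     {links_html}
--   </div>
-- </nav>"""
-- ===== Notes on version B (the rewrite author's own statement) =====
-- stated objective: alternative
-- what changed: A's single pass with a last_phase flag deciding when to emit separator and group header is replaced by a grouped decomposition: first group consecutive views by phase, then render each group's header and links as a block and join the blocks with the separator.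
import Mathlib
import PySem

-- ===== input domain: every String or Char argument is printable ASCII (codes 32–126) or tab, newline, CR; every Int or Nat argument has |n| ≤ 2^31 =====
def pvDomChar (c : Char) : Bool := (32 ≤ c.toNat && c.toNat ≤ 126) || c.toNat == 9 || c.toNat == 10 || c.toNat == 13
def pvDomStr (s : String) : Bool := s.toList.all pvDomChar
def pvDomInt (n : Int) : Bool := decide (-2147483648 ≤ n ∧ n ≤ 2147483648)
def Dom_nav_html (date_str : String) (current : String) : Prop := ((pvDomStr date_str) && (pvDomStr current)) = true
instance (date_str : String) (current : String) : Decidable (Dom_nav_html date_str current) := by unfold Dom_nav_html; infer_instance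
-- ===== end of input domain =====

-- B replaces A's single pass with a last_phase state flag by a grouped decomposition
-- (group consecutive views by phase, render each group as a block, join blocks with
-- the separator); objective: alternative decomposition, same cost.

-- ===== PORT A =====
def allViews : List (String × String × String) := [
  ("price",       "가격신호",   "P1"),
  ("macro",       "거시지표",   "P1"),
  ("correlation", "상관관계",   "P1"),
  ("regime",      "국면해설",   "P1"),
  ("country",     "국가",       "P2"),
  ("sector",      "섹터",       "P2"),
  ("bond",        "채권",       "P2"),
  ("style",       "스타일",     "P2"),
  ("allocation",  "배분안",     "P2"),
  ("alternative", "대체자산",   "P2")]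

def nav_html (date_str : String) (current : String) : String :=
  let st := allViews.foldl (fun (st : List String × Option String) v =>
    let key := v.1
    let label := v.2.1
    let phase := v.2.2
    let links := st.1
    let lastPhase := st.2
    let (links, lastPhase) :=
      if some phase ≠ lastPhase then
        let links := links ++ (if lastPhase ≠ none then ["<div class=\"ma-nav-sep\"></div>"] else [])
        (links ++ ["<span class=\"ma-nav-group\">" ++ phase ++ "</span>"], some phase)
      else (links, lastPhase)
    let cls := if key == current then "ma-nav-link current" else "ma-nav-link"
    (links ++ ["<a href=\"../" ++ key ++ "/" ++ date_str ++ ".html\" class=\"" ++ cls ++ "\">" ++ label ++ "</a>"],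
     lastPhase)) ([], none)
  let links_html := PySem.Str.join "\n    " st.1
  "<nav class=\"ma-nav\">\n  <div class=\"ma-nav-inner\">\n    <a href=\"../../index.html\" class=\"ma-logo\"><span></span>미래에셋생명</a>\n    "
    ++ links_html ++ "\n  </div>\n</nav>"

-- ===== PORT B =====
-- port of Source B's _phase_groups: group consecutive views sharing a phase
def phaseGroups (views : List (String × String × String)) : List (String × List (String × String)) :=
  views.foldl (fun groups v =>
    let key := v.1
    let label := v.2.1
    let phase := v.2.2
    match groups.getLast? with
    | some g =>
        if g.1 == phase then groups.dropLast ++ [(g.1, g.2 ++ [(key, label)])]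
        else groups ++ [(phase, [(key, label)])]
    | none => [(phase, [(key, label)])]) []

def nav_html_alt (date_str : String) (current : String) : String :=
  let blocks := (phaseGroups allViews).map (fun g =>
    let lines := ["<span class=\"ma-nav-group\">" ++ g.1 ++ "</span>"] ++
      g.2.map (fun kl =>
        let cls := if kl.1 == current then "ma-nav-link current" else "ma-nav-link"
        "<a href=\"../" ++ kl.1 ++ "/" ++ date_str ++ ".html\" class=\"" ++ cls ++ "\">" ++ kl.2 ++ "</a>")
    PySem.Str.join "\n    " lines)
  let links_html := PySem.Str.join "\n    <div class=\"ma-nav-sep\"></div>\n    " blocks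
  "<nav class=\"ma-nav\">\n  <div class=\"ma-nav-inner\">\n    <a href=\"../../index.html\" class=\"ma-logo\"><span></span>미래에셋생명</a>\n    "
    ++ links_html ++ "\n  </div>\n</nav>"

-- ===== PRECONDITION & SPEC =====
def Spec_nav_html (date_str : String) (current : String) (out : String) : Prop := out = nav_html_alt date_str current
instance (date_str : String) (current : String) (out : String) : Decidable (Spec_nav_html date_str current out) := by unfold Spec_nav_html; infer_instance

-- ===== CLAIM (what is proved, stated in full; the proofs are below) =====
def Claim_equal_nav_html : Prop := ∀ (date_str : String) (current : String), Dom_nav_html date_str current → Spec_nav_html date_str current (nav_html date_str current)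

-- ===== LEMMAS AND PROOFS =====
set_option maxHeartbeats 4000000 in
set_option maxRecDepth 4000 in
theorem nav_html_eq (d c : String) : nav_html d c = nav_html_alt d c := by
  apply String.toList_inj.mp
  simp [nav_html, nav_html_alt, allViews, phaseGroups, PySem.Str.join, PySem.Chars.join, List.intercalate, List.intersperse, apply_ite String.toList]

-- ===== VERDICT (by name: the statement is the Claim_ definition above) =====
theorem nav_html_spec : Claim_equal_nav_html := by
  intro d c _
  exact nav_html_eq d c
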